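-- pv_equiv track=rewrite | github.com/Aasthaengg/IBMdataset | Python_codes/p03156/s640910644.py | Three_Categorize
-- ===== SOURCE A (Python) =====
-- def Three_Categorize(P,A,B):
--     count_1 = 0
--     count_2 = 0
--     count_3 = 0
--     for i in P:
--         if i <= A:
--             count_1 +=1
--         elif (i > A) & (i <= B):
--             count_2 +=1
--         elif i > B:
--             count_3 +=1
--
--     return [count_1, count_2, count_3]
-- ===== SOURCE B (Python) =====
-- def Three_Categorize(P, A, B):
--     s = sorted(P)
--     n = len(s)
--
--     def bisect_right(x, lo, hi):
--         # first index in [lo, hi] whose element exceeds x (s sorted)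
--         while lo < hi:
--             mid = (lo + hi) // 2
--             if x < s[mid]:
--                 hi = mid
--             else:
--                 lo = mid + 1
--         return lo
--
--     i = bisect_right(A, 0, n)
--     j = bisect_right(B, i, n)
--     return [i, j - i, n - j]
-- ===== Notes on version B (the rewrite author's own statement) =====
-- stated objective: alternative
-- what changed: Replaces A's single scan with three running counters by sorting a copy of P and locating the two threshold boundaries with a hand-written bisect_right binary search (lo-clamped for the second threshold), returning the bucket sizes as index differences.
import Mathlib
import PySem

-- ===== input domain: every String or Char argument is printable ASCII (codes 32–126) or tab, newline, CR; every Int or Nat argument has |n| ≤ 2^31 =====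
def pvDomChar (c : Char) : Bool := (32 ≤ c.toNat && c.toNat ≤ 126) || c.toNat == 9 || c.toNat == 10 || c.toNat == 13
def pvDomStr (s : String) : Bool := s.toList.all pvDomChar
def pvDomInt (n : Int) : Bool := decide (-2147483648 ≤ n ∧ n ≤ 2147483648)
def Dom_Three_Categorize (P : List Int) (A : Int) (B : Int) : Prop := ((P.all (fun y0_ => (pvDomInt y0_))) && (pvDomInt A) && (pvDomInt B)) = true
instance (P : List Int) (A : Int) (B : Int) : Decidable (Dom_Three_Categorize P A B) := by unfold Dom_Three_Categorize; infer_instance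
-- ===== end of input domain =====

-- B replaces A's three-counter scan by sort + hand-written binary search for the two
-- threshold boundaries (objective: alternative algorithm; not claimed faster).

-- ===== PORT A =====
-- literal transliteration of A's loop: three counters, if/elif chain in source order
def Three_Categorize (P : List Int) (A : Int) (B : Int) : List Int :=
  let st := P.foldl (fun (c : Int × Int × Int) i =>
    if i ≤ A then (c.1 + 1, c.2.1, c.2.2)
    else if A < i ∧ i ≤ B then (c.1, c.2.1 + 1, c.2.2)
    else if B < i then (c.1, c.2.1, c.2.2 + 1)
    else c) (0, 0, 0)
  [st.1, st.2.1, st.2.2]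

-- ===== PORT B =====
-- Source B's hand-written bisect_right loop; s[mid] has 0 ≤ mid < len(s) at every call
-- reached from Three_Categorize_alt, so getD is exact there
def pvBisect (s : List Int) (x : Int) (lo hi : Nat) : Nat :=
  if lo < hi then
    let mid := (lo + hi) / 2
    if x < s.getD mid 0 then pvBisect s x lo mid
    else pvBisect s x (mid + 1) hi
  else lo
termination_by hi - lo
decreasing_by all_goals omega

def Three_Categorize_alt (P : List Int) (A : Int) (B : Int) : List Int :=
  let s := PySem.List.sorted P (fun x => x) false
  let n := s.length
  let i := pvBisect s A 0 n
  let j := pvBisect s B i n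
  [(i : Int), (j : Int) - (i : Int), (n : Int) - (j : Int)]

-- ===== PRECONDITION & SPEC =====
def Spec_Three_Categorize (P : List Int) (A : Int) (B : Int) (out : List Int) : Prop := out = Three_Categorize_alt P A B
instance (P : List Int) (A : Int) (B : Int) (out : List Int) : Decidable (Spec_Three_Categorize P A B out) := by unfold Spec_Three_Categorize; infer_instance

-- ===== CLAIM (what is proved, stated in full; the proofs are below) =====
def Claim_equal_Three_Categorize : Prop := ∀ (P : List Int) (A : Int) (B : Int), Dom_Three_Categorize P A B → Spec_Three_Categorize P A B (Three_Categorize P A B)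

-- ===== LEMMAS AND PROOFS =====

-- A's fold accumulates the three predicate counts
lemma foldA_eq (A B : Int) : ∀ (P : List Int) (c : Int × Int × Int),
    P.foldl (fun (c : Int × Int × Int) i =>
      if i ≤ A then (c.1 + 1, c.2.1, c.2.2)
      else if A < i ∧ i ≤ B then (c.1, c.2.1 + 1, c.2.2)
      else if B < i then (c.1, c.2.1, c.2.2 + 1)
      else c) c
    = (c.1 + P.countP (fun i => i ≤ A),
       c.2.1 + P.countP (fun i => A < i ∧ i ≤ B),
       c.2.2 + P.countP (fun i => A < i ∧ B < i)) := by
  intro P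
  induction P with
  | nil => intro c; simp
  | cons x t ih =>
    intro c
    simp only [List.foldl_cons, List.countP_cons, ih]
    by_cases h1 : x ≤ A <;> by_cases h2 : x ≤ B <;>
      simp [h1, h2, Bool.decide_and, not_le.mp] <;> omega

lemma count_le_of_lt (s : List Int) (x : Int) (m : Nat)
    (hs : s.Pairwise (· ≤ ·)) (hm : m < s.length) (h : x < s[m]) :
    s.countP (fun a => a ≤ x) ≤ m := by
  have hsplit := List.take_append_drop m s
  calc s.countP (fun a => a ≤ x)
      = (s.take m).countP (fun a => a ≤ x) + (s.drop m).countP (fun a => a ≤ x) := by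
        conv_lhs => rw [← hsplit]
        exact List.countP_append ..
    _ ≤ m + 0 := by
        apply Nat.add_le_add
        · exact le_trans List.countP_le_length (by simp [List.length_take])
        · apply Nat.le_of_eq
          rw [List.countP_eq_zero]
          intro a ha
          obtain ⟨k, hk, hak⟩ := List.mem_iff_getElem.mp ha
          have hk' : m + k < s.length := by
            have := List.length_drop (l := s) (i := m); omega
          rw [List.getElem_drop] at hak
          have hle : s[m] ≤ s[m + k] := by
            rcases Nat.eq_zero_or_pos k with h0 | h0
            · subst h0; simp
            · exact (List.pairwise_iff_getElem.mp hs) m (m + k) hm hk' (by omega)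
          simp only [decide_eq_true_eq]
          omega
    _ = m := by omega

lemma count_ge_of_le (s : List Int) (x : Int) (m : Nat)
    (hs : s.Pairwise (· ≤ ·)) (hm : m < s.length) (h : s[m] ≤ x) :
    m + 1 ≤ s.countP (fun a => a ≤ x) := by
  have hsplit := List.take_append_drop (m + 1) s
  have htake : (s.take (m + 1)).countP (fun a => a ≤ x) = m + 1 := by
    rw [List.countP_eq_length.mpr, List.length_take]
    · omega
    · intro a ha
      obtain ⟨k, hk, hak⟩ := List.mem_iff_getElem.mp ha
      rw [List.getElem_take] at hak
      have hkm : k < m + 1 := by simp [List.length_take] at hk; omega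
      have hle : s[k] ≤ s[m] := by
        rcases Nat.lt_or_ge k m with h0 | h0
        · exact (List.pairwise_iff_getElem.mp hs) k m (by omega) hm h0
        · have : k = m := by omega
          subst this; simp
      simp only [decide_eq_true_eq]
      omega
  calc m + 1 = (s.take (m + 1)).countP (fun a => a ≤ x) := htake.symm
    _ ≤ (s.take (m + 1)).countP (fun a => a ≤ x) + (s.drop (m + 1)).countP (fun a => a ≤ x) := by omega
    _ = s.countP (fun a => a ≤ x) := by
        conv_rhs => rw [← hsplit]; rw [List.countP_append]

lemma pvBisect_eq (s : List Int) (x : Int) : ∀ (d lo hi : Nat),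
    hi - lo ≤ d → s.Pairwise (· ≤ ·) → lo ≤ hi → hi ≤ s.length →
    s.countP (fun a => a ≤ x) ≤ hi →
    pvBisect s x lo hi = max lo (s.countP (fun a => a ≤ x)) := by
  intro d
  induction d with
  | zero =>
    intro lo hi hd hs hlohi hhi hc
    have : lo = hi := by omega
    subst this
    rw [pvBisect]
    simp only [Nat.lt_irrefl, if_false]
    omega
  | succ d ih =>
    intro lo hi hd hs hlohi hhi hc
    rw [pvBisect]
    by_cases hlt : lo < hi
    · simp only [if_pos hlt]
      by_cases hx : x < s.getD ((lo + hi) / 2) 0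
      · simp only [if_pos hx]
        have hmlt : (lo + hi) / 2 < s.length := by omega
        have hget : s.getD ((lo + hi) / 2) 0 = s[(lo + hi) / 2] := List.getD_eq_getElem s 0 hmlt
        have hcm : s.countP (fun a => a ≤ x) ≤ (lo + hi) / 2 :=
          count_le_of_lt s x _ hs hmlt (by rwa [hget] at hx)
        exact ih lo _ (by omega) hs (by omega) (by omega) hcm
      · simp only [if_neg hx]
        have hmlt : (lo + hi) / 2 < s.length := by omega
        have hget : s.getD ((lo + hi) / 2) 0 = s[(lo + hi) / 2] := List.getD_eq_getElem s 0 hmlt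
        have hcm : (lo + hi) / 2 + 1 ≤ s.countP (fun a => a ≤ x) :=
          count_ge_of_le s x _ hs hmlt (by rw [hget] at hx; omega)
        rw [ih _ hi (by omega) hs (by omega) hhi hc]
        omega
    · simp only [if_neg hlt]
      omega

-- the three counts partition the list
lemma count_partition (A B : Int) (l : List Int) :
    l.countP (fun i => i ≤ A) + l.countP (fun i => A < i ∧ i ≤ B)
      + l.countP (fun i => A < i ∧ B < i) = l.length := by
  induction l with
  | nil => simp
  | cons x t ih =>
    simp only [List.countP_cons, List.length_cons, Bool.decide_and, Bool.and_eq_true,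
      decide_eq_true_eq] at ih ⊢
    split_ifs <;> omega

lemma count_mid_eq (A B : Int) (l : List Int) :
    l.countP (fun i => A < i ∧ i ≤ B)
      = max (l.countP (fun i => i ≤ A)) (l.countP (fun i => i ≤ B))
        - l.countP (fun i => i ≤ A) := by
  induction l with
  | nil => simp
  | cons x t ih =>
    rcases le_or_gt A B with hAB | hAB
    · have h1 : t.countP (fun i => i ≤ A) ≤ t.countP (fun i => i ≤ B) := by
        apply List.countP_mono_left
        intro a _ ha
        simp only [decide_eq_true_eq] at *
        omega
      simp only [List.countP_cons, decide_eq_true_eq] at ih ⊢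
      split_ifs <;> omega
    · have h1 : t.countP (fun i => i ≤ B) ≤ t.countP (fun i => i ≤ A) := by
        apply List.countP_mono_left
        intro a _ ha
        simp only [decide_eq_true_eq] at *
        omega
      simp only [List.countP_cons, decide_eq_true_eq] at ih ⊢
      split_ifs <;> omega

-- ===== VERDICT (by name: the statement is the Claim_ definition above) =====
theorem Three_Categorize_spec : Claim_equal_Three_Categorize := by
  intro P A B _
  unfold Spec_Three_Categorize Three_Categorize Three_Categorize_alt
  set s := PySem.List.sorted P (fun x => x) false
  have hperm : s.Perm P := PySem.List.sorted_perm P (fun x => x) false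
  have hsorted : s.Pairwise (· ≤ ·) := by
    have := PySem.List.sorted_pairwise P (fun x => x)
    simpa using this
  have hlen : s.length = P.length := hperm.length_eq
  have hcA : s.countP (fun a => a ≤ A) = P.countP (fun i => i ≤ A) := hperm.countP_eq _
  have hcB : s.countP (fun a => a ≤ B) = P.countP (fun i => i ≤ B) := hperm.countP_eq _
  have hcmid : s.countP (fun i => A < i ∧ i ≤ B) = P.countP (fun i => A < i ∧ i ≤ B) := hperm.countP_eq _
  have hchi : s.countP (fun i => A < i ∧ B < i) = P.countP (fun i => A < i ∧ B < i) := hperm.countP_eq _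
  have hb1 : pvBisect s A 0 s.length = s.countP (fun a => a ≤ A) := by
    rw [pvBisect_eq s A s.length 0 s.length (by omega) hsorted (Nat.zero_le _) le_rfl List.countP_le_length]
    omega
  have hb2 : pvBisect s B (pvBisect s A 0 s.length) s.length
      = max (s.countP (fun a => a ≤ A)) (s.countP (fun a => a ≤ B)) := by
    rw [hb1, pvBisect_eq s B s.length _ s.length (by omega) hsorted List.countP_le_length le_rfl List.countP_le_length]
  rw [hb1] at hb2
  simp only [foldA_eq, hb1, hb2]
  have hpart := count_partition A B s
  have hmid := count_mid_eq A B s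
  have hmax1 : s.countP (fun a => a ≤ A) ≤ max (s.countP (fun a => a ≤ A)) (s.countP (fun a => a ≤ B)) := le_max_left _ _
  simp only [List.cons.injEq, and_true]
  refine ⟨?_, ?_, ?_⟩ <;> omega
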